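-- pv_equiv track=rewrite | github.com/DewPeaceTigers/AlgorithmStudy | weeks/week_34/PG_12798/yeri.py | solution
-- ===== SOURCE A (Python) =====
-- def solution(A, B):
--     A.sort()
--     B.sort()
--     a = 0
--     b = 0
--     count = 0
--     while a<len(A) and b<len(B):
--         if A[a] < B[b]:
--             count+=1
--             a+=1
--         b+=1
--     return count
-- ===== SOURCE B (Python) =====
-- def _upper_bound(xs, x):
--     # binary search: first index of sorted xs whose element is > x
--     lo = 0
--     hi = len(xs)
--     while lo < hi:
--         mid = (lo + hi) // 2
--         if xs[mid] <= x:
--             lo = mid + 1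
--         else:
--             hi = mid
--     return lo
--
--
-- def solution(A, B):
--     # Hall's theorem: the maximum number of pairs (a, b) with a < b equals
--     # len(A) minus the largest deficiency over suffixes of sorted A, where the
--     # deficiency of a suffix is its size minus the number of B elements
--     # strictly greater than its minimum. Sorts A and B in place like the
--     # original.
--     A.sort()
--     B.sort()
--     n = len(A)
--     m = len(B)
--     deficiency = 0
--     remaining = n
--     for a in A:
--         d = remaining - (m - _upper_bound(B, a))
--         if d > deficiency:
--             deficiency = d
--         remaining -= 1
--     return n - deficiency
-- ===== Notes on version B (the rewrite author's own statement) =====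
-- stated objective: alternative
-- what changed: Replaces the greedy two-pointer pairing sweep by a Hall's-theorem deficiency computation: after sorting, B does no pairing at all but returns len(A) minus the largest suffix deficiency (suffix size minus the number of B elements exceeding the suffix minimum), evaluated with one hand-written binary search per A element.
import Mathlib
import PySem

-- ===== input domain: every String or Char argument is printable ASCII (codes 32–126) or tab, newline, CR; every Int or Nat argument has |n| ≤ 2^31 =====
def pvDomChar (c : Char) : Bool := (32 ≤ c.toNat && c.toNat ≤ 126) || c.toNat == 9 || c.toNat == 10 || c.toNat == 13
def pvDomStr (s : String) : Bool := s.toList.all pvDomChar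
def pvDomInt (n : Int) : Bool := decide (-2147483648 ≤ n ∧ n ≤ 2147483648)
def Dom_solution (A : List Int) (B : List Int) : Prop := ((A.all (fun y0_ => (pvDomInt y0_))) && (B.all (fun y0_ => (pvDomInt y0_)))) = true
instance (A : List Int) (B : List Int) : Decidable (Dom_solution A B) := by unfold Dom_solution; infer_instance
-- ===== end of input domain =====

-- B replaces A's greedy two-pointer pairing sweep by a Hall-deficiency computation:
-- answer = len(A) - max suffix deficiency, with one binary search per A element
-- (objective: alternative algorithm, same O(n log n) cost). Both Pythons sort A and
-- B in place; the equivalence proved here is about the return value (the mutation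
-- is identical anyway).

-- ===== PORT A =====
-- the while loop: a/b index advance = consuming heads of the sorted suffixes
def solutionLoop : List Int → List Int → Int
  | a :: as, b :: bs => if a < b then 1 + solutionLoop as bs else solutionLoop (a :: as) bs
  | _, _ => 0

def solution (A : List Int) (B : List Int) : Int :=
  solutionLoop (PySem.List.sorted A (fun x => x) false) (PySem.List.sorted B (fun x => x) false)

-- ===== PORT B =====
-- _upper_bound's while loop; xs[mid] is always in range here (lo < hi ≤ len xs at
-- every call from upperBound), so getD is exact for Python's xs[mid]
def ubLoop (xs : List Int) (x : Int) (lo hi : Nat) : Nat :=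
  if h : lo < hi then
    let mid := (lo + hi) / 2
    if xs.getD mid 0 ≤ x then ubLoop xs x (mid + 1) hi
    else ubLoop xs x lo mid
  else lo
termination_by hi - lo
decreasing_by all_goals omega

def upperBound (xs : List Int) (x : Int) : Nat := ubLoop xs x 0 xs.length

-- the 'for a in A' loop carrying (remaining, deficiency)
def altLoop (Bs : List Int) (m : Int) : List Int → Int → Int → Int
  | [], _, acc => acc
  | a :: as, rem, acc =>
      let d := rem - (m - (upperBound Bs a : Int))
      altLoop Bs m as (rem - 1) (if d > acc then d else acc)

def solution_alt (A : List Int) (B : List Int) : Int :=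
  let As := PySem.List.sorted A (fun x => x) false
  let Bs := PySem.List.sorted B (fun x => x) false
  let n : Int := (As.length : Int)
  let m : Int := (Bs.length : Int)
  n - altLoop Bs m As n 0

-- ===== PRECONDITION & SPEC =====
def Spec_solution (A : List Int) (B : List Int) (out : Int) : Prop := out = solution_alt A B
instance (A : List Int) (B : List Int) (out : Int) : Decidable (Spec_solution A B out) := by unfold Spec_solution; infer_instance

-- ===== CLAIM (what is proved, stated in full; the proofs are below) =====
def Claim_equal_solution : Prop := ∀ (A : List Int) (B : List Int), Dom_solution A B → Spec_solution A B (solution A B)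

-- ===== LEMMAS AND PROOFS =====

-- number of elements of bs strictly greater than x / at most x
def cGT (bs : List Int) (x : Int) : Int := (bs.countP (fun b => decide (x < b)) : Int)
def cLE (bs : List Int) (x : Int) : Nat := bs.countP (fun b => decide (b ≤ x))

-- largest suffix deficiency of as against bs
def defMax : List Int → List Int → Int
  | [], _ => 0
  | a :: as, bs => max (((as.length : Int) + 1) - cGT bs a) (defMax as bs)

theorem cLE_add_cGT (x : Int) : ∀ bs : List Int, (cLE bs x : Int) + cGT bs x = (bs.length : Int) := by
  intro bs
  induction bs with
  | nil => simp [cLE, cGT]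
  | cons b bs ih =>
    simp only [cLE, cGT, List.countP_cons, List.length_cons] at *
    by_cases h : b ≤ x
    · simp [h, not_lt.mpr h] at *; omega
    · simp [h, not_le.mp h] at *; omega

theorem cGT_nonneg (bs : List Int) (x : Int) : 0 ≤ cGT bs x := by
  unfold cGT; positivity

theorem cGT_le (bs : List Int) (x : Int) : cGT bs x ≤ (bs.length : Int) := by
  unfold cGT; exact_mod_cast List.countP_le_length

theorem cGT_all {bs : List Int} {x : Int} (h : ∀ b ∈ bs, x < b) : cGT bs x = (bs.length : Int) := by
  unfold cGT
  rw [List.countP_eq_length.mpr (fun b hb => decide_eq_true (h b hb))]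

theorem cGT_cons (b : Int) (bs : List Int) (x : Int) :
    cGT (b :: bs) x = (if x < b then 1 else 0) + cGT bs x := by
  simp only [cGT, List.countP_cons]
  by_cases h : x < b <;> simp [h, add_comm]

-- L2 helper: a B element ≤ every element of as never matches, dropping it keeps defMax
theorem defMax_cons_b_ge (b : Int) (bs : List Int) :
    ∀ as : List Int, (∀ y ∈ as, b ≤ y) → defMax as (b :: bs) = defMax as bs := by
  intro as
  induction as with
  | nil => intro _; rfl
  | cons a as ih =>
    intro h
    have hba : b ≤ a := h a (by simp)
    simp only [defMax, cGT_cons, if_neg (not_lt.mpr hba), zero_add]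
    rw [ih (fun y hy => h y (List.mem_cons_of_mem _ hy))]

theorem defMax_anti (b : Int) (bs : List Int) :
    ∀ as : List Int, defMax as (b :: bs) ≤ defMax as bs := by
  intro as
  induction as with
  | nil => simp [defMax]
  | cons a as ih =>
    simp only [defMax, cGT_cons]
    have := cGT_nonneg bs a
    split_ifs with h <;> omega

theorem defMax_ge_sub (bs : List Int) :
    ∀ as : List Int, as ≠ [] → (as.length : Int) - (bs.length : Int) ≤ defMax as bs := by
  intro as hne
  cases as with
  | nil => exact absurd rfl hne
  | cons a as =>
    simp only [defMax, List.length_cons]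
    have := cGT_le bs a
    push_cast
    omega

theorem defMax_le_cons (b : Int) (bs : List Int) (hbs : ∀ y ∈ bs, b ≤ y) :
    ∀ as : List Int, defMax as bs ≤ max ((as.length : Int) - (bs.length : Int)) (defMax as (b :: bs)) := by
  intro as
  induction as with
  | nil => simp [defMax]
  | cons h as ih =>
    simp only [defMax, List.length_cons, cGT_cons]
    by_cases hb : h < b
    · have hall : cGT bs h = (bs.length : Int) :=
        cGT_all (fun y hy => lt_of_lt_of_le hb (hbs y hy))
      push_cast
      omega
    · have : ¬ h < b := hb
      simp only [if_neg this, zero_add] at *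
      omega

-- key step, A-head strictly smaller: consuming the pair keeps the deficiency
theorem defMax_L1 {a b : Int} {as bs : List Int} (hab : a < b)
    (hbs : (b :: bs).Pairwise (· ≤ ·)) :
    defMax (a :: as) (b :: bs) = defMax as bs := by
  have hb : ∀ y ∈ bs, b ≤ y := (List.pairwise_cons.mp hbs).1
  have h1 : cGT (b :: bs) a = (bs.length : Int) + 1 := by
    have := cGT_all (bs := b :: bs) (x := a)
      (fun y hy => by
        rcases List.mem_cons.mp hy with rfl | hy
        · exact hab
        · exact lt_of_lt_of_le hab (hb y hy))
    simpa using this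
  have hanti := defMax_anti b bs as
  have hle := defMax_le_cons b bs hb as
  cases as with
  | nil =>
    simp only [defMax, h1, List.length_nil]
    omega
  | cons a' as' =>
    have hge := defMax_ge_sub bs (a' :: as') (by simp)
    simp only [defMax, h1] at *
    omega

-- B-head not larger than A-head: that B element matches nothing, drop it
theorem defMax_L2 {a b : Int} {as bs : List Int} (hba : b ≤ a)
    (has : (a :: as).Pairwise (· ≤ ·)) :
    defMax (a :: as) (b :: bs) = defMax (a :: as) bs := by
  apply defMax_cons_b_ge
  intro y hy
  rcases List.mem_cons.mp hy with rfl | hy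
  · exact hba
  · exact le_trans hba ((List.pairwise_cons.mp has).1 y hy)

-- A's greedy loop computes length minus the largest Hall deficiency
theorem loop_eq : ∀ (n : Nat) (as bs : List Int), as.length + bs.length ≤ n →
    as.Pairwise (· ≤ ·) → bs.Pairwise (· ≤ ·) →
    solutionLoop as bs = (as.length : Int) - max 0 (defMax as bs) := by
  intro n
  induction n with
  | zero =>
    intro as bs hn _ _
    have : as = [] ∧ bs = [] := by
      constructor <;> (cases as <;> cases bs <;> simp_all)
    rcases this with ⟨rfl, rfl⟩
    simp [solutionLoop, defMax]
  | succ n ih =>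
    intro as bs hn has hbs
    cases bs with
    | nil =>
      cases as with
      | nil => simp [solutionLoop, defMax]
      | cons a as =>
        have hd : ∀ as' : List Int, defMax as' [] = (as'.length : Int) := by
          intro as'
          induction as' with
          | nil => rfl
          | cons x xs ihx => simp [defMax, cGT, ihx]
        simp only [solutionLoop, hd]
        omega
    | cons b bs =>
      cases as with
      | nil => simp [solutionLoop, defMax]
      | cons a as =>
        by_cases hab : a < b
        · have hIH := ih as bs (by simp at hn ⊢; omega) has.tail hbs.tail
          simp only [solutionLoop, if_pos hab, hIH, defMax_L1 hab hbs,
            List.length_cons]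
          push_cast
          omega
        · have hIH := ih (a :: as) bs (by simp at hn ⊢; omega) has hbs.tail
          simp only [solutionLoop, if_neg hab, hIH,
            defMax_L2 (not_lt.mp hab) has]

-- the binary search returns the boundary index c
theorem ubLoop_eq (xs : List Int) (x : Int) (c : Nat)
    (hc : ∀ i (h : i < xs.length), (xs[i] ≤ x ↔ i < c)) :
    ∀ (k lo hi : Nat), hi - lo ≤ k → lo ≤ c → c ≤ hi → hi ≤ xs.length →
      ubLoop xs x lo hi = c := by
  intro k
  induction k with
  | zero =>
    intro lo hi h1 h2 h3 h4
    rw [ubLoop, dif_neg (by omega)]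
    omega
  | succ k ih =>
    intro lo hi h1 h2 h3 h4
    by_cases hlt : lo < hi
    · rw [ubLoop, dif_pos hlt]
      simp only
      have hmid : (lo + hi) / 2 < xs.length := by omega
      rw [List.getD_eq_getElem xs 0 hmid]
      by_cases hx : xs[(lo + hi) / 2] ≤ x
      · rw [if_pos hx]
        have : (lo + hi) / 2 < c := (hc _ hmid).mp hx
        exact ih _ _ (by omega) (by omega) h3 h4
      · rw [if_neg hx]
        have : ¬ (lo + hi) / 2 < c := fun h => hx ((hc _ hmid).mpr h)
        exact ih _ _ (by omega) h2 (by omega) (by omega)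
    · rw [ubLoop, dif_neg hlt]
      omega

-- on a sorted list, the boundary is the count of elements ≤ x
theorem sorted_index_iff (x : Int) : ∀ (xs : List Int), xs.Pairwise (· ≤ ·) →
    ∀ i (h : i < xs.length), (xs[i] ≤ x ↔ i < cLE xs x) := by
  intro xs
  induction xs with
  | nil => intro _ i h; simp at h
  | cons a as ih =>
    intro hp i hi
    obtain ⟨ha, pas⟩ := List.pairwise_cons.mp hp
    by_cases hax : a ≤ x
    · cases i with
      | zero =>
        simp only [List.getElem_cons_zero]
        simp [cLE, hax]
      | succ i =>
        have h2 := ih pas i (by simpa using hi)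
        simp only [List.getElem_cons_succ, h2]
        unfold cLE
        simp [hax]
    · have h0 : as.countP (fun b => decide (b ≤ x)) = 0 := by
        apply List.countP_eq_zero.mpr
        intro y hy
        simp only [decide_eq_true_eq]
        have := ha y hy
        omega
      have hcle : cLE (a :: as) x = 0 := by
        simp [cLE, h0, hax]
      rw [hcle]
      cases i with
      | zero => simpa using hax
      | succ i =>
        simp only [List.getElem_cons_succ]
        constructor
        · intro hle
          exfalso
          have hilen : i < as.length := by simp at hi; omega
          have := ha _ (List.getElem_mem hilen)
          omega
        · omega

theorem upperBound_eq (xs : List Int) (x : Int) (hs : xs.Pairwise (· ≤ ·)) :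
    upperBound xs x = cLE xs x := by
  have hcle : cLE xs x ≤ xs.length := List.countP_le_length
  exact ubLoop_eq xs x (cLE xs x) (sorted_index_iff x xs hs) xs.length 0 xs.length
    (by omega) (by omega) hcle le_rfl

-- B's fold computes max(acc, defMax)
theorem altLoop_eq (Bs : List Int) (hBs : Bs.Pairwise (· ≤ ·)) :
    ∀ (as : List Int) (acc : Int), 0 ≤ acc →
      altLoop Bs (Bs.length : Int) as (as.length : Int) acc = max acc (defMax as Bs) := by
  intro as
  induction as with
  | nil => intro acc h; simp [altLoop, defMax]; omega
  | cons a as ih =>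
    intro acc hacc
    have hub : (upperBound Bs a : Int) = (cLE Bs a : Int) := by
      rw [upperBound_eq Bs a hBs]
    have hsplit := cLE_add_cGT a Bs
    simp only [altLoop, List.length_cons]
    push_cast
    rw [show ((as.length : Int) + 1 - 1) = (as.length : Int) by omega]
    have hd : ((as.length : Int) + 1) - ((Bs.length : Int) - (upperBound Bs a : Int))
        = ((as.length : Int) + 1) - cGT Bs a := by
      rw [hub]; omega
    rw [hd]
    set d := ((as.length : Int) + 1) - cGT Bs a with hdd
    have hIH := ih (if d > acc then d else acc) (by split_ifs <;> omega)
    rw [hIH]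
    simp only [defMax]
    split_ifs <;> omega

-- ===== VERDICT (by name: the statement is the Claim_ definition above) =====
theorem solution_spec : Claim_equal_solution := by
  intro A B _
  unfold Spec_solution solution solution_alt
  have hA : (PySem.List.sorted A (fun x => x) false).Pairwise (· ≤ ·) :=
    PySem.List.sorted_pairwise A (fun x => x)
  have hB : (PySem.List.sorted B (fun x => x) false).Pairwise (· ≤ ·) :=
    PySem.List.sorted_pairwise B (fun x => x)
  simp only
  rw [loop_eq ((PySem.List.sorted A (fun x => x) false).length +
      (PySem.List.sorted B (fun x => x) false).length) _ _ le_rfl hA hB,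
    altLoop_eq _ hB _ 0 le_rfl]
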